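-- pv_equiv track=rewrite | github.com/fossabot/bout_runners | bout_runners/metadata/metadata_reader.py | get_sorted_columns
-- ===== SOURCE A (Python) =====
-- def get_sorted_columns(all_column_names):
--     """
--     Return all columns sorted.
--
--     The columns will be sorted alphabetically first by table
--     name, then alphabetically by column name, with the exception of
--     the columns from the run table, which will be presented first.
--
--     Parameters
--     ----------
--     all_column_names : dict of tuple
--         Dict containing the column names
--         On the form
--         >>> {'table_1': ('table_1_column_1', ...),
--         ...  'table_2': ('table_2_column_1', ...),
--         ...  'run': ('run_column_1', ...), ...}
--
--
--     Returns
--     -------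
--     sorted_columns : tuple
--         Dict containing the column names
--         On the form
--         >>> ('run.column_name_1',
--         ...  'run.column_name_2',
--         ...  ...
--         ...  'table_name_1.column_name_1',
--         ...  'table_name_1.column_name_2', ...)
--     """
--     sorted_columns = list()
--     table_names = sorted(all_column_names.keys())
--     table_names.pop(table_names.index('run'))
--     table_names.insert(0, 'run')
--     for table_name in table_names:
--         for column_name in sorted(all_column_names[table_name]):
--             sorted_columns.append(f'{table_name}.{column_name}')
--     return sorted_columns
-- ===== SOURCE B (Python) =====
-- def get_sorted_columns(all_column_names):
--     pairs = [(table, column)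
--              for table, columns in all_column_names.items()
--              for column in columns]
--     run_columns = sorted(column for table, column in pairs if table == 'run')
--     rest = sorted((table, column) for table, column in pairs if table != 'run')
--     return (['run.' + column for column in run_columns]
--             + [f'{table}.{column}' for table, column in rest])
-- ===== Notes on version B (the rewrite author's own statement) =====
-- stated objective: simpler
-- what changed: A sorts the key list, pops and re-inserts 'run', then runs nested loops with a per-table sort and dict lookup; B flattens the dict once into (table, column) pairs and issues two flat sorted() calls (run columns, and remaining pairs under the composite key (table, column)), concatenating the formatted results.
-- crash fix: When 'run' is not a key of the dict, A raises ValueError (from table_names.index('run')) while B returns the remaining tables' columns sorted by (table, column). — e.g. on get_sorted_columns([("tab", ["x"])]): A raises ValueError, B returns ["tab.x"]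
import Mathlib
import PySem

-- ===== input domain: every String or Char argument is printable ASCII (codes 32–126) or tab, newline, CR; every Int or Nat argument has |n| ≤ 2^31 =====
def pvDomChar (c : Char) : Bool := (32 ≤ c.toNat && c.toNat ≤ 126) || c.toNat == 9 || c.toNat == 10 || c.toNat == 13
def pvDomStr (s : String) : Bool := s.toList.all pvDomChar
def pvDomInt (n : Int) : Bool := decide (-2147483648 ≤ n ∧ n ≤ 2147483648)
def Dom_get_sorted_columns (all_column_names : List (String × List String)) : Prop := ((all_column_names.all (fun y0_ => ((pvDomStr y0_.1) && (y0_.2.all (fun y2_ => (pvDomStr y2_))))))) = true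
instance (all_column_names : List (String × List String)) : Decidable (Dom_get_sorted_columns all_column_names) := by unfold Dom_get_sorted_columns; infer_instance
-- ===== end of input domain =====

-- B flattens the dict once into (table, column) pairs and sorts two flat lists instead of
-- A's pop/insert of the key list plus nested per-table sorting loops (objective: simpler).

-- ===== PORT A =====
-- dict decoding shared by both ports: the dict[str, tuple] argument arrives as its
-- association list; keys in first-occurrence order, value = first match (exact for
-- lists encoding a Python dict, whose keys are unique).
def pvKeys (d : List (String × List String)) : List String := PySem.List.dedup (d.map (·.1))
def pvGet (d : List (String × List String)) (t : String) : List String := (List.lookup t d).getD []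

def get_sorted_columns (all_column_names : List (String × List String)) : List String :=
  let table_names := PySem.List.sorted (pvKeys all_column_names) (fun x => x) false
  match PySem.List.index? table_names "run" with
  | none => []      -- table_names.index('run'): Python raises ValueError here (outside Pre_)
  | some i =>
    match PySem.List.pop? table_names (i : Int) with
    | none => []    -- unreachable: i is a valid index
    | some (_, popped) =>
      (PySem.List.insert popped 0 "run").foldl
        (fun sorted_columns table_name =>
          (PySem.List.sorted (pvGet all_column_names table_name) (fun x => x) false).foldl
            (fun sorted_columns column_name => sorted_columns ++ [table_name ++ "." ++ column_name])
            sorted_columns)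
        []

-- ===== PORT B =====
def get_sorted_columns_alt (all_column_names : List (String × List String)) : List String :=
  let pairs := (pvKeys all_column_names).flatMap
    (fun table => (pvGet all_column_names table).map (fun column => (table, column)))
  let run_columns := PySem.List.sorted
    ((pairs.filter (fun q => q.1 == "run")).map (·.2)) (fun x => x) false
  let rest := PySem.List.sorted2 (pairs.filter (fun q => q.1 != "run")) (·.1) (·.2) false
  run_columns.map (fun column => "run." ++ column)
    ++ rest.map (fun q => q.1 ++ "." ++ q.2)

-- ===== PRECONDITION & SPEC =====
-- Pre_ excludes exactly the dicts without a 'run' key, on which A raises ValueError.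
def Pre_get_sorted_columns (all_column_names : List (String × List String)) : Prop :=
  "run" ∈ all_column_names.map (·.1)
instance (all_column_names : List (String × List String)) : Decidable (Pre_get_sorted_columns all_column_names) := by
  unfold Pre_get_sorted_columns; infer_instance
def pvWitness_get_sorted_columns : (List (String × List String)) :=
  [("run", ["b", "a"]), ("tab", ["z", "c"])]

-- When 'run' is not a key of the dict, A raises ValueError (from table_names.index('run'))
-- while B returns the remaining tables' columns sorted by (table, column).
def Raises_get_sorted_columns (all_column_names : List (String × List String)) : Prop :=
  "run" ∉ all_column_names.map (·.1)
instance (all_column_names : List (String × List String)) : Decidable (Raises_get_sorted_columns all_column_names) := by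
  unfold Raises_get_sorted_columns; infer_instance
def pvRaiseWitness_get_sorted_columns : (List (String × List String)) := [("tab", ["x"])]
def pvRaiseWitnessOut_get_sorted_columns : List String := ["tab.x"]

def Spec_get_sorted_columns (all_column_names : List (String × List String)) (out : List String) : Prop := out = get_sorted_columns_alt all_column_names
instance (all_column_names : List (String × List String)) (out : List String) : Decidable (Spec_get_sorted_columns all_column_names out) := by unfold Spec_get_sorted_columns; infer_instance

-- ===== CLAIM (what is proved, stated in full; the proofs are below) =====
def Claim_equal_get_sorted_columns : Prop := ∀ (all_column_names : List (String × List String)), Dom_get_sorted_columns all_column_names → Pre_get_sorted_columns all_column_names → Spec_get_sorted_columns all_column_names (get_sorted_columns all_column_names)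
def Claim_raises_get_sorted_columns : Prop := (∀ (all_column_names : List (String × List String)), Dom_get_sorted_columns all_column_names → Raises_get_sorted_columns all_column_names → ¬ Pre_get_sorted_columns all_column_names) ∧ (Dom_get_sorted_columns (pvRaiseWitness_get_sorted_columns) ∧ Raises_get_sorted_columns (pvRaiseWitness_get_sorted_columns) ∧ get_sorted_columns_alt (pvRaiseWitness_get_sorted_columns) = pvRaiseWitnessOut_get_sorted_columns)

-- ===== LEMMAS AND PROOFS =====

-- Python's tuple comparison: sorting pairs by the two components is sorting by the
-- lexicographic order on pairs.
lemma pv_sorted2_eq_sorted_lex (xs : List (String × String)) :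
    PySem.List.sorted2 xs (·.1) (·.2) false
      = PySem.List.sorted xs (fun q => toLex q) false := by
  have hb : (fun (a b : String × String) =>
        (decide (a.1 < b.1) || (!decide (b.1 < a.1) && decide (a.2 < b.2))))
      = (fun (a b : String × String) => decide (toLex a < toLex b)) := by
    funext a b
    rcases lt_trichotomy a.1 b.1 with h | h | h
    · simp [Prod.Lex.lt_iff, h, asymm h]
    · simp [Prod.Lex.lt_iff, h, lt_self_iff_false]
    · simp [Prod.Lex.lt_iff, lt_asymm h, h.ne', h]
  simp only [PySem.List.sorted2, PySem.List.sorted, hb, Bool.false_eq_true, if_false]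

-- erasing the index of the unique occurrence of a in a duplicate-free list is filtering a out
lemma pv_eraseIdx_eq_filter {α : Type} [DecidableEq α] (l : List α) (a : α) (k : Nat)
    (hk : k < l.length) (hnd : l.Nodup) (hv : l[k] = a) :
    l.eraseIdx k = l.filter (fun x => x != a) := by
  induction l generalizing k with
  | nil => simp at hk
  | cons x t ih =>
    have hx : x ∉ t := (List.nodup_cons.mp hnd).1
    have hndt : t.Nodup := (List.nodup_cons.mp hnd).2
    cases k with
    | zero =>
      simp only [List.getElem_cons_zero] at hv
      subst hv
      have hall : ∀ b ∈ t, (b != x) = true := by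
        intro b hb
        simp only [bne_iff_ne, ne_eq]
        exact fun h => hx (h ▸ hb)
      simp [List.filter_eq_self.mpr hall]
    | succ k =>
      have hkt : k < t.length := by simpa using hk
      have hv' : t[k] = a := by simpa using hv
      have hxa : x ≠ a := fun h => hx (by rw [h, ← hv']; exact List.getElem_mem hkt)
      simp [List.eraseIdx_cons_succ, hxa, ih k hkt hndt hv']

-- a guarded flatMap over a duplicate-free list hits its single selected element
lemma pv_flatMap_single {α β : Type} [DecidableEq α] (l : List α) (a : α) (g : α → List β)
    (hnd : l.Nodup) (ha : a ∈ l) :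
    (l.flatMap (fun t => if t = a then g t else [])) = g a := by
  induction l with
  | nil => cases ha
  | cons x t ih =>
    have hx : x ∉ t := (List.nodup_cons.mp hnd).1
    have hndt : t.Nodup := (List.nodup_cons.mp hnd).2
    rcases List.mem_cons.mp ha with h | h
    · subst h
      have ht : t.flatMap (fun tt => if tt = a then g tt else []) = [] := by
        rw [List.flatMap_eq_nil_iff]
        intro tt htt
        have he : tt ≠ a := fun e => hx (e ▸ htt)
        exact if_neg he
      simp [ht]
    · have hxa : x ≠ a := fun e => hx (e ▸ h)
      simp [List.flatMap_cons, hxa, ih hndt h]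

-- a guarded flatMap is a flatMap over the filtered list
lemma pv_flatMap_guard {α β : Type} (l : List α) (p : α → Bool) (g : α → List β) :
    (l.flatMap (fun t => if p t then g t else [])) = (l.filter p).flatMap g := by
  induction l with
  | nil => rfl
  | cons x t ih =>
    by_cases h : p x <;> simp [h, ih]

lemma pv_main (d : List (String × List String))
    (hpre : "run" ∈ d.map (·.1)) :
    get_sorted_columns d = get_sorted_columns_alt d := by
  classical
  have hnd : (pvKeys d).Nodup := PySem.List.nodup_dedup _
  have hrun : "run" ∈ pvKeys d := (PySem.List.mem_dedup _ _).mpr hpre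
  set ks := pvKeys d with hks
  set tn := PySem.List.sorted ks (fun x => x) false with htn
  have htnmem : "run" ∈ tn := (PySem.List.mem_sorted ks _ false _).mpr hrun
  obtain ⟨k, hk⟩ := Option.isSome_iff_exists.mp
    ((PySem.List.index?_isSome_iff tn "run").mpr htnmem)
  obtain ⟨hklt, hkval, -⟩ := PySem.List.getElem_of_index?_eq_some hk
  have htnperm : tn.Perm ks := PySem.List.sorted_perm ks _ false
  have htnd : tn.Nodup := htnperm.nodup_iff.mpr hnd
  have htple : tn.Pairwise (fun a b => a ≤ b) := by
    have h := PySem.List.sorted_pairwise ks (fun x : String => x)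
    rw [← htn] at h
    exact h
  have htplt : tn.Pairwise (fun a b => a < b) :=
    (htple.and htnd).imp fun h => lt_of_le_of_ne h.1 h.2
  have herase : tn.eraseIdx k = tn.filter (fun x => x != "run") :=
    pv_eraseIdx_eq_filter tn "run" k hklt htnd hkval
  -- A as a flatMap over 'run' followed by the remaining sorted table names
  have hA : get_sorted_columns d
      = ((PySem.List.sorted (pvGet d "run") (fun x => x) false).map (fun c => "run" ++ "." ++ c))
        ++ (tn.eraseIdx k).flatMap
            (fun t => (PySem.List.sorted (pvGet d t) (fun x => x) false).map
              (fun c => t ++ "." ++ c)) := by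
    simp only [get_sorted_columns]
    rw [← hks, ← htn, hk]
    simp only [PySem.List.pop?_natCast tn k hklt, PySem.List.insert_zero,
      PySem.List.foldl_append_singleton_eq_map]
    rw [PySem.List.foldl_append_eq_flatMap
      (fun t => (PySem.List.sorted (pvGet d t) (fun x => x) false).map (fun c => t ++ "." ++ c))]
    simp [List.flatMap_cons]
  -- B's run-column list is the run table's columns
  have hBrun : (((ks.flatMap (fun t => (pvGet d t).map (fun c => (t, c)))).filter
        (fun q => q.1 == "run")).map (·.2))
      = pvGet d "run" := by
    rw [List.filter_flatMap]
    have h1 : ∀ t : String, (((pvGet d t).map (fun c => (t, c))).filter (fun q => q.1 == "run"))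
        = if t = "run" then (pvGet d t).map (fun c => (t, c)) else [] := by
      intro t
      rcases eq_or_ne t "run" with h | h
      · simp [List.filter_map, Function.comp_def, h]
      · simp [List.filter_map, Function.comp_def, h]
    simp only [h1]
    rw [pv_flatMap_single ks "run" _ hnd hrun]
    simp [List.map_map, Function.comp_def]
  -- B's remaining pairs are the pairs of the non-run tables
  have hBrest : ((ks.flatMap (fun t => (pvGet d t).map (fun c => (t, c)))).filter
        (fun q => q.1 != "run"))
      = (ks.filter (fun t => t != "run")).flatMap (fun t => (pvGet d t).map (fun c => (t, c))) := by
    rw [List.filter_flatMap]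
    have h1 : ∀ t : String, (((pvGet d t).map (fun c => (t, c))).filter (fun q => q.1 != "run"))
        = if (t != "run") then (pvGet d t).map (fun c => (t, c)) else [] := by
      intro t
      rcases eq_or_ne t "run" with h | h
      · simp [List.filter_map, Function.comp_def, h]
      · have hb2 : (t != "run") = true := by simp [h]
        simp [List.filter_map, Function.comp_def, hb2]
    simp only [h1]
    exact pv_flatMap_guard ks _ _
  have hperm1 : (tn.eraseIdx k).Perm (ks.filter (fun t => t != "run")) := by
    rw [herase]
    exact htnperm.filter _
  -- the remaining blocks of A ARE python's sorted((table, column)) of the non-run pairs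
  have hmain2 : ((tn.eraseIdx k).flatMap
        (fun t => (PySem.List.sorted (pvGet d t) (fun x => x) false).map (fun c => (t, c))))
      = PySem.List.sorted2
          ((ks.filter (fun t => t != "run")).flatMap (fun t => (pvGet d t).map (fun c => (t, c))))
          (·.1) (·.2) false := by
    rw [pv_sorted2_eq_sorted_lex]
    apply PySem.List.eq_of_perm_of_pairwise_le_of_injective
      (fun q : String × String => toLex q) toLex.injective
    · refine (List.Perm.flatMap hperm1 ?_).trans
        (PySem.List.sorted_perm _ (fun q : String × String => toLex q) false).symm
      intro t _
      exact (PySem.List.sorted_perm (pvGet d t) _ false).map _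
    · rw [List.flatMap_def, List.pairwise_flatten]
      constructor
      · intro l' hl'
        obtain ⟨t, -, rfl⟩ := List.mem_map.mp hl'
        rw [List.pairwise_map]
        refine (PySem.List.sorted_pairwise (pvGet d t) (fun x : String => x)).imp ?_
        intro c1 c2 h
        exact Prod.Lex.le_iff.mpr (Or.inr ⟨rfl, h⟩)
      · rw [List.pairwise_map]
        have hplt : (tn.eraseIdx k).Pairwise (fun a b => a < b) :=
          htplt.sublist (List.eraseIdx_sublist ..)
        refine hplt.imp ?_
        intro t1 t2 hlt x hx y hy
        obtain ⟨c1, -, rfl⟩ := List.mem_map.mp hx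
        obtain ⟨c2, -, rfl⟩ := List.mem_map.mp hy
        exact le_of_lt (Prod.Lex.lt_iff.mpr (Or.inl hlt))
    · exact PySem.List.sorted_pairwise _ _
  rw [hA]
  simp only [get_sorted_columns_alt]
  rw [← hks, hBrun, hBrest, ← hmain2]
  simp [List.map_flatMap, List.map_map, Function.comp_def]

-- ===== VERDICT (by name: the statement is the Claim_ definition above) =====
theorem get_sorted_columns_spec : Claim_equal_get_sorted_columns := by
  intro d _ hpre
  exact pv_main d hpre

theorem get_sorted_columns_raises : Claim_raises_get_sorted_columns := by
  unfold Claim_raises_get_sorted_columns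
  exact ⟨fun _ _ h => h, by decide⟩

-- self-check: the crash-fix witness indeed lies outside Pre_ (A raises there)
theorem pvRaiseWitness_outside_Pre_ok :
    ¬ Pre_get_sorted_columns pvRaiseWitness_get_sorted_columns := by
  have h := get_sorted_columns_raises
  unfold Claim_raises_get_sorted_columns at h
  exact h.1 pvRaiseWitness_get_sorted_columns (by decide) h.2.2.1
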